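-- pv_equiv track=rewrite | github.com/hiro4336/tenki | tenki/f01.py | CreateHourList
-- ===== SOURCE A (Python) =====
-- def CreateHourList(l):
--     """
--     ///hourの値を調整
--     「0～24、0～24、0～24」の塊になっているので「0～72」にする
--     """
--     r=[]
--     loopnum=len(l)
--
--     for i in range(0,loopnum,1):
--         if i<=23:
--             r.append(int(l[i]))
--         elif i>=24 and i<=47:
--             r.append(int(l[i])+24)
--         elif i>=48:
--             r.append(int(l[i])+48)
--     return r
-- ===== SOURCE B (Python) =====
-- def CreateHourList(l):
--     # Precompute the offset table (0 for the first day block, 24 for the second,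
--     # 48 for everything after), then pair it with the values by zip.
--     offs = [0] * 24 + [24] * 24 + [48] * max(len(l) - 48, 0)
--     return [int(x) + o for x, o in zip(l, offs)]
-- ===== Notes on version B (the rewrite author's own statement) =====
-- stated objective: alternative
-- what changed: Replaces the indexed loop with index-range branches by precomputing an offset table ([0]*24 + [24]*24 + [48]*rest) and zipping it with the values, so no index test or index access remains.
import Mathlib
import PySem

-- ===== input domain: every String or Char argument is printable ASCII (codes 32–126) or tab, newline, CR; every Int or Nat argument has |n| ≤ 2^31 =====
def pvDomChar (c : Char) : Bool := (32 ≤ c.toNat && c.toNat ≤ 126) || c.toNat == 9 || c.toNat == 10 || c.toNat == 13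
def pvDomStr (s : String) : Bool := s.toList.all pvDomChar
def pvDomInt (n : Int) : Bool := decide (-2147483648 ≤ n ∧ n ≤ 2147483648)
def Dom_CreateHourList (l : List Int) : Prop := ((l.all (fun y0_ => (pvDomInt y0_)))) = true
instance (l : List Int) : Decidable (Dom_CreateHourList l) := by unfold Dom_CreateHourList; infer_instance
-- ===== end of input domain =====

-- B replaces A's indexed loop with branches on the index by precomputing an offset table
-- ([0]*24 + [24]*24 + [48]*rest) and zipping it with the values (objective: alternative).

-- ===== PORT A =====
def CreateHourList (l : List Int) : List Int :=
  let loopnum : Int := l.length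
  (PySem.List.pyRange 0 loopnum 1).foldl (fun r i =>
    if i ≤ 23 then r ++ [PySem.List.pyGetD l i 0]
    else if 24 ≤ i ∧ i ≤ 47 then r ++ [PySem.List.pyGetD l i 0 + 24]
    else if 48 ≤ i then r ++ [PySem.List.pyGetD l i 0 + 48]
    else r) []

-- ===== PORT B =====
-- offs = [0]*24 + [24]*24 + [48]*max(len(l)-48, 0); result = [x + o for x, o in zip(l, offs)]
def CreateHourList_alt (l : List Int) : List Int :=
  let offs : List Int :=
    List.replicate 24 0 ++ List.replicate 24 24
      ++ List.replicate (max ((l.length : Int) - 48) 0).toNat 48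
  (l.zip offs).map (fun p => p.1 + p.2)

-- ===== PRECONDITION & SPEC =====
def Spec_CreateHourList (l : List Int) (out : List Int) : Prop := out = CreateHourList_alt l
instance (l : List Int) (out : List Int) : Decidable (Spec_CreateHourList l out) := by unfold Spec_CreateHourList; infer_instance

-- ===== CLAIM (what is proved, stated in full; the proofs are below) =====
def Claim_equal_CreateHourList : Prop := ∀ (l : List Int), Dom_CreateHourList l → Spec_CreateHourList l (CreateHourList l)

-- ===== LEMMAS AND PROOFS =====

-- A's loop, unrolled: it maps each index k to l[k] plus the offset selected by the branch chain.
theorem CreateHourList_eq_map (l : List Int) :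
    CreateHourList l = (List.range l.length).map
      (fun (k : Nat) => PySem.List.pyGetD l (k : Int) 0
        + (if (k:Int) ≤ 23 then 0 else if (k:Int) ≤ 47 then 24 else 48)) := by
  unfold CreateHourList
  have hf : (fun (r : List Int) (i : Int) =>
      if i ≤ 23 then r ++ [PySem.List.pyGetD l i 0]
      else if 24 ≤ i ∧ i ≤ 47 then r ++ [PySem.List.pyGetD l i 0 + 24]
      else if 48 ≤ i then r ++ [PySem.List.pyGetD l i 0 + 48]
      else r)
    = (fun r i => r ++ [PySem.List.pyGetD l i 0
        + (if i ≤ 23 then 0 else if i ≤ 47 then 24 else 48)]) := by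
    funext r i
    split_ifs <;> simp_all <;> omega
  simp only [hf, PySem.List.foldl_append_singleton_eq_map]
  rw [PySem.List.pyRange_one]
  simp only [List.map_map, Function.comp_def, zero_add, Int.sub_zero, Int.toNat_natCast, List.nil_append]

-- The offset table: its length pads l, and its k-th entry is the branch chain's offset.
theorem offs_getElem (l : List Int) (k : Nat)
    (hk : k < (List.replicate 24 (0:Int) ++ List.replicate 24 24
      ++ List.replicate (max ((l.length : Int) - 48) 0).toNat 48).length) :
    (List.replicate 24 (0:Int) ++ List.replicate 24 24
      ++ List.replicate (max ((l.length : Int) - 48) 0).toNat 48)[k]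
    = (if (k:Int) ≤ 23 then 0 else if (k:Int) ≤ 47 then 24 else 48) := by
  by_cases h48 : k < 48
  · rw [List.getElem_append_left (by simp; omega)]
    by_cases h24 : k < 24
    · rw [List.getElem_append_left (by simp; omega), List.getElem_replicate]
      rw [if_pos (by exact_mod_cast by omega : (k:Int) ≤ 23)]
    · rw [List.getElem_append_right (by simp; omega), List.getElem_replicate]
      rw [if_neg (by omega : ¬ (k:Int) ≤ 23), if_pos (by exact_mod_cast by omega : (k:Int) ≤ 47)]
  · rw [List.getElem_append_right (by simp; omega), List.getElem_replicate]
    rw [if_neg (by omega : ¬ (k:Int) ≤ 23), if_neg (by omega : ¬ (k:Int) ≤ 47)]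

theorem CreateHourList_AB (l : List Int) : CreateHourList l = CreateHourList_alt l := by
  rw [CreateHourList_eq_map]
  unfold CreateHourList_alt
  apply List.ext_getElem
  · simp; omega
  · intro k h1 h2
    have hklen : k < l.length := by simpa using h1
    simp only [List.getElem_map, List.getElem_range, List.getElem_zip]
    rw [PySem.List.pyGetD_natCast, List.getD_eq_getElem _ _ hklen, offs_getElem]

-- ===== VERDICT (by name: the statement is the Claim_ definition above) =====
theorem CreateHourList_spec : Claim_equal_CreateHourList := by
  intro l _
  unfold Spec_CreateHourList
  exact CreateHourList_AB l
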